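-- pv_equiv track=rewrite | github.com/icacedo/splicing-practice | isoform.py | short_exon
-- ===== SOURCE A (Python) =====
-- def short_exon(dons, accs, seqlen, flank, min):
--
-- 	# first exon
-- 	exon_beg = flank + 1
-- 	exon_end = dons[0] -1
-- 	exon_len = exon_end - exon_beg + 1
-- 	if exon_len < min: return True
--
-- 	# last exon
-- 	exon_beg = accs[-1] + 1
-- 	exon_end = seqlen - flank + 1
-- 	exon_len = exon_end - exon_beg + 1
-- 	if exon_len < min: return True
--
-- 	# interior exons
-- 	for i in range(1, len(dons)):
-- 		exon_beg = accs[i-1] + 1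
-- 		exon_end = dons[i] - 1
-- 		exon_len = exon_end - exon_beg
-- 		if exon_len < min: return True
-- 	return False
-- ===== SOURCE B (Python) =====
-- def short_exon(dons, accs, seqlen, flank, min):
--     # collect every exon length with its case's exact formula, then one aggregate test
--     lengths = [dons[0] - flank - 1, seqlen - flank - accs[-1] + 1]
--     for i in range(1, len(dons)):
--         lengths.append(dons[i] - accs[i - 1] - 2)
--     return sorted(lengths)[0] < min
-- ===== Notes on version B (the rewrite author's own statement) =====
-- stated objective: alternative
-- what changed: B builds the full list of exon lengths (first/last/interior, each with A's exact formula) and tests the smallest one via sorted(lengths)[0] < min, instead of A's sequence of guarded early-exit comparisons.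
-- outside the precondition, e.g. on short_exon([1, 10], [], 20, 0, 100): A returns True, B raises IndexError
import Mathlib
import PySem

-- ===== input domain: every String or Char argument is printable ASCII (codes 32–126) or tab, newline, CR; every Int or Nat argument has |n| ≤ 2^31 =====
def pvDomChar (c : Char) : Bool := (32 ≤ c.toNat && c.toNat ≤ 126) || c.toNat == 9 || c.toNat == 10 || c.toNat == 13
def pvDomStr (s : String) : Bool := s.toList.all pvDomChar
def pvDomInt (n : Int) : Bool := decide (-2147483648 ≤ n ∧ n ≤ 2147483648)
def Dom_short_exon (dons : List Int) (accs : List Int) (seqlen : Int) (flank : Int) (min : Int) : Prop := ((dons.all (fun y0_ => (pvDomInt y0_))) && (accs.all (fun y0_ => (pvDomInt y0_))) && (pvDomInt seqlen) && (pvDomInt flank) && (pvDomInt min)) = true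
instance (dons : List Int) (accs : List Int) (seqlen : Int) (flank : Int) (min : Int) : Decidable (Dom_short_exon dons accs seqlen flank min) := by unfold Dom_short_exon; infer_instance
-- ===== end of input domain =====

-- ===== PORT A =====
-- Port of A: guarded early-exit checks (first exon, last exon, then a loop over interior exons).
def shortExonLoop (dons : List Int) (accs : List Int) (min : Int) : List Int → Bool
  | [] => false
  | i :: rest =>
      if (PySem.List.pyGetD dons i 0 - 1) - (PySem.List.pyGetD accs (i - 1) 0 + 1) < min then true
      else shortExonLoop dons accs min rest

def short_exon (dons : List Int) (accs : List Int) (seqlen : Int) (flank : Int) (min : Int) : Bool :=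
  let exon_len1 := (PySem.List.pyGetD dons 0 0 - 1) - (flank + 1) + 1
  if exon_len1 < min then true
  else
    let exon_len2 := (seqlen - flank + 1) - (PySem.List.pyGetD accs (-1) 0 + 1) + 1
    if exon_len2 < min then true
    else shortExonLoop dons accs min (PySem.List.pyRange 1 (dons.length : Int) 1)

-- ===== PORT B =====
-- Port of B: build the list of all exon lengths, then test the smallest (sorted(lengths)[0]).
def short_exon_alt (dons : List Int) (accs : List Int) (seqlen : Int) (flank : Int) (min : Int) : Bool :=
  let lengths : List Int :=
    (PySem.List.pyGetD dons 0 0 - flank - 1) ::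
    (seqlen - flank - PySem.List.pyGetD accs (-1) 0 + 1) ::
    (PySem.List.pyRange 1 (dons.length : Int) 1).map
      (fun i => PySem.List.pyGetD dons i 0 - PySem.List.pyGetD accs (i - 1) 0 - 2)
  decide (PySem.List.pyGetD (PySem.List.sorted lengths (fun x => x) false) 0 0 < min)

-- ===== PRECONDITION & SPEC =====
-- Pre_ excludes exactly the inputs where list indexing raises IndexError in Python: A needs
-- dons[0], accs[-1] and accs[i-1] for i < len(dons); on the excluded inputs where A still
-- returns (an early True before reaching the missing index), B itself raises IndexError.
def Pre_short_exon (dons : List Int) (accs : List Int) (seqlen : Int) (flank : Int) (min : Int) : Prop :=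
  dons ≠ [] ∧ accs ≠ [] ∧ dons.length ≤ accs.length + 1
instance (dons : List Int) (accs : List Int) (seqlen : Int) (flank : Int) (min : Int) : Decidable (Pre_short_exon dons accs seqlen flank min) := by unfold Pre_short_exon; infer_instance
def pvWitness_short_exon : List Int × List Int × Int × Int × Int := ([10, 25], [18], 40, 2, 3)
def Spec_short_exon (dons : List Int) (accs : List Int) (seqlen : Int) (flank : Int) (min : Int) (out : Bool) : Prop := out = short_exon_alt dons accs seqlen flank min
instance (dons : List Int) (accs : List Int) (seqlen : Int) (flank : Int) (min : Int) (out : Bool) : Decidable (Spec_short_exon dons accs seqlen flank min out) := by unfold Spec_short_exon; infer_instance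

-- ===== CLAIM (what is proved, stated in full; the proofs are below) =====
def Claim_equal_short_exon : Prop := ∀ (dons : List Int) (accs : List Int) (seqlen : Int) (flank : Int) (min : Int), Dom_short_exon dons accs seqlen flank min → Pre_short_exon dons accs seqlen flank min → Spec_short_exon dons accs seqlen flank min (short_exon dons accs seqlen flank min)

-- ===== LEMMAS AND PROOFS =====

-- A's loop is an 'any' over the index list.
theorem shortExonLoop_eq_any (dons accs : List Int) (min : Int) (l : List Int) :
    shortExonLoop dons accs min l =
      l.any (fun i => decide ((PySem.List.pyGetD dons i 0 - 1) - (PySem.List.pyGetD accs (i - 1) 0 + 1) < min)) := by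
  induction l with
  | nil => rfl
  | cons i rest ih =>
      simp only [shortExonLoop, List.any_cons]
      split_ifs with h <;> simp [h, ih]

-- The head of the sorted list is below m iff some element is below m.
theorem sorted_head_lt_iff (l : List Int) (m : Int) (hne : l ≠ []) :
    (PySem.List.pyGetD (PySem.List.sorted l (fun x => x) false) 0 0 < m) ↔ ∃ x ∈ l, x < m := by
  rcases hs : PySem.List.sorted l (fun x => x) false with _ | ⟨h, t⟩
  · exact absurd ((PySem.List.sorted_eq_nil_iff _ _ _).1 hs) hne
  · rw [PySem.List.pyGetD_zero_cons]
    constructor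
    · intro hlt
      have hm : h ∈ l := by
        have := PySem.List.mem_sorted l (fun x => x) false h
        simp [hs] at this; exact this
      exact ⟨h, hm, hlt⟩
    · rintro ⟨x, hx, hxm⟩
      exact lt_of_le_of_lt (PySem.List.key_head_sorted_le l (fun x => x) hs x hx) hxm

theorem short_exon_eq_alt (dons accs : List Int) (seqlen flank min : Int) (hd : dons ≠ []) :
    short_exon dons accs seqlen flank min = short_exon_alt dons accs seqlen flank min := by
  unfold short_exon short_exon_alt
  rw [shortExonLoop_eq_any]
  have hne : ((PySem.List.pyGetD dons 0 0 - flank - 1) ::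
      (seqlen - flank - PySem.List.pyGetD accs (-1) 0 + 1) ::
      (PySem.List.pyRange 1 (dons.length : Int) 1).map
        (fun i => PySem.List.pyGetD dons i 0 - PySem.List.pyGetD accs (i - 1) 0 - 2) : List Int) ≠ [] := by
    simp
  rw [Bool.eq_iff_iff]
  simp only [decide_eq_true_eq]
  rw [sorted_head_lt_iff _ _ hne]
  simp only [List.mem_cons, List.mem_map]
  constructor
  · intro h
    split_ifs at h with h1 h2
    · exact ⟨_, Or.inl rfl, by omega⟩
    · exact ⟨_, Or.inr (Or.inl rfl), by omega⟩
    · simp only [List.any_eq_true, decide_eq_true_eq] at h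
      obtain ⟨i, hi, hlt⟩ := h
      exact ⟨_, Or.inr (Or.inr ⟨i, hi, rfl⟩), by omega⟩
  · rintro ⟨x, hx, hxm⟩
    split_ifs with h1 h2
    · rfl
    · rfl
    · simp only [List.any_eq_true, decide_eq_true_eq]
      rcases hx with rfl | rfl | ⟨i, hi, rfl⟩
      · omega
      · omega
      · exact ⟨i, hi, by omega⟩

-- ===== VERDICT (by name: the statement is the Claim_ definition above) =====
theorem short_exon_spec : Claim_equal_short_exon := by
  intro dons accs seqlen flank min _ hpre
  exact short_exon_eq_alt dons accs seqlen flank min hpre.1
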